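-- pv_equiv track=rewrite | github.com/lupangdesaili/ace2005_arabic | run_trigger.py | trigger_data_further_process
-- ===== SOURCE A (Python) =====
-- def trigger_data_further_process(input):
--     notes = input['notes']
--     input_notes = []
--     for i, note in enumerate(notes):
--         if i == 0:
--             if "T" in notes[i]:
--                 input_notes.append("B-T")
--             else:
--                 input_notes.append("O")
--         else:
--             if "T" in notes[i]:
--                 if "T" not in notes[i-1]:
--                     input_notes.append("B-T")
--                 else:
--                     input_notes.append("I-T")
--             else:
--                 input_notes.append("O")
--     return input_notes
-- ===== SOURCE B (Python) =====
-- def trigger_data_further_process(input):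
--     # Segment the notes into maximal runs of equal "T"-membership, then expand
--     # each run at once: a True run becomes "B-T" followed by "I-T"s, a False
--     # run becomes "O"s.  Return value only; no per-element lookback needed.
--     def runs(notes):
--         if not notes:
--             return []
--         flag = "T" in notes[0]
--         k = 1
--         while k < len(notes) and ("T" in notes[k]) == flag:
--             k += 1
--         head = ["B-T"] + ["I-T"] * (k - 1) if flag else ["O"] * k
--         return head + runs(notes[k:])
--     return runs(input['notes'])
-- ===== Notes on version B (the rewrite author's own statement) =====
-- stated objective: alternative
-- what changed: Replaces the indexed element-by-element lookback (notes[i-1] with an i==0 special case) by a run-segmentation traversal: split notes into maximal runs of equal 'T'-membership and expand each run wholesale into 'B-T'+'I-T'* or 'O'*.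
import Mathlib
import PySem

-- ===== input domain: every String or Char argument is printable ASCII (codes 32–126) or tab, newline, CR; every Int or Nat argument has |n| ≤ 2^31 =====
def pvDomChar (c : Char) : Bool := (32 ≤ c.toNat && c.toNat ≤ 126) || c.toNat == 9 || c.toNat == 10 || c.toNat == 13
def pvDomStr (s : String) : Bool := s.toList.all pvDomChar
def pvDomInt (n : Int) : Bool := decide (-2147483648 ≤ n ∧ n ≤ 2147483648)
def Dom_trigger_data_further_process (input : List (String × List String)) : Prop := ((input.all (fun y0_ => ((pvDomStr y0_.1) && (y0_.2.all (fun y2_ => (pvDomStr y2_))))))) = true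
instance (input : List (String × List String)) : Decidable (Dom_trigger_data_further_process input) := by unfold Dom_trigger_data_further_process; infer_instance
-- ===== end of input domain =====

-- B replaces A's indexed lookback (notes[i-1], i==0 special case) by segmenting
-- notes into maximal runs of equal "T"-membership and expanding each run at once
-- (alternative decomposition, same cost).


-- ===== PORT A =====
-- literal transliteration of A: enumerate loop appending one tag per element,
-- with the i == 0 special case and the notes[i-1] lookback.  The pyGetD
-- default "" is never used: i and i-1 are always in range here.
def trigger_data_further_process (input : List (String × List String)) : List String :=
  match (PySem.Dict.mk input).get? "notes" with
  | none => []   -- unreachable under Pre_ (Python raises KeyError)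
  | some notes =>
      (PySem.List.enumerate notes 0).foldl
        (fun input_notes p =>
          let i := p.1
          if i == 0 then
            if PySem.Str.isIn "T" (PySem.List.pyGetD notes i "") then input_notes ++ ["B-T"]
            else input_notes ++ ["O"]
          else
            if PySem.Str.isIn "T" (PySem.List.pyGetD notes i "") then
              if !(PySem.Str.isIn "T" (PySem.List.pyGetD notes (i - 1) "")) then input_notes ++ ["B-T"]
              else input_notes ++ ["I-T"]
            else input_notes ++ ["O"]) []

-- ===== PORT B =====
-- transliteration of Source B's recursive `runs`: the while loop counting k is the
-- takeWhile of the equal-flag prefix (k = run.length + 1), notes[k:] is the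
-- corresponding dropWhile.
def pvAltRuns (notes : List String) : List String :=
  match notes with
  | [] => []
  | x :: xs =>
      let flag := PySem.Str.isIn "T" x
      let run := xs.takeWhile (fun y => PySem.Str.isIn "T" y == flag)
      let head := if flag then "B-T" :: List.replicate run.length "I-T"
                  else List.replicate (run.length + 1) "O"
      head ++ pvAltRuns (xs.dropWhile (fun y => PySem.Str.isIn "T" y == flag))
termination_by notes.length
decreasing_by
  simp only [List.length_cons]
  exact Nat.lt_succ_of_le (List.length_dropWhile_le _ _)

def trigger_data_further_process_alt (input : List (String × List String)) : List String :=
  match (PySem.Dict.mk input).get? "notes" with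
  | none => []   -- unreachable under Pre_ (Python raises KeyError)
  | some notes => pvAltRuns notes

-- ===== PRECONDITION & SPEC =====
-- A (and B) raise KeyError when the dict has no 'notes' key; exactly those inputs are excluded.
def Pre_trigger_data_further_process (input : List (String × List String)) : Prop :=
  (PySem.Dict.mk input).contains "notes" = true
instance (input : List (String × List String)) : Decidable (Pre_trigger_data_further_process input) := by unfold Pre_trigger_data_further_process; infer_instance

def pvWitness_trigger_data_further_process : (List (String × List String)) :=
  [("notes", ["The Tunis attack", "happened", "today"])]

def Spec_trigger_data_further_process (input : List (String × List String)) (out : List String) : Prop := out = trigger_data_further_process_alt input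
instance (input : List (String × List String)) (out : List String) : Decidable (Spec_trigger_data_further_process input out) := by unfold Spec_trigger_data_further_process; infer_instance

-- ===== CLAIM (what is proved, stated in full; the proofs are below) =====
def Claim_equal_trigger_data_further_process : Prop := ∀ (input : List (String × List String)), Dom_trigger_data_further_process input → Pre_trigger_data_further_process input → Spec_trigger_data_further_process input (trigger_data_further_process input)

-- ===== LEMMAS AND PROOFS =====

-- the per-element flag
def pvF (s : String) : Bool := PySem.Str.isIn "T" s

-- reference recursion: one tag per element, threading the previous flag
def pvTags (prev : Bool) (l : List String) : List String :=
  match l with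
  | [] => []
  | x :: xs => (if pvF x then (if prev then "I-T" else "B-T") else "O") :: pvTags (pvF x) xs

theorem pvTags_length (prev : Bool) (l : List String) : (pvTags prev l).length = l.length := by
  induction l generalizing prev with
  | nil => rfl
  | cons x xs ih => simp [pvTags, ih]

theorem pvTags_getElem (prev : Bool) (l : List String) (i : Nat) (h : i < l.length) :
    (pvTags prev l)[i]'(by rw [pvTags_length]; exact h) =
      (if pvF l[i] then (if (if i = 0 then prev else pvF (l[i-1]'(by omega))) then "I-T" else "B-T") else "O") := by
  induction l generalizing prev i with
  | nil => simp at h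
  | cons x xs ih =>
      cases i with
      | zero => simp [pvTags]
      | succ j =>
          simp only [pvTags, List.getElem_cons_succ]
          rw [ih (pvF x) j (by simpa using h)]
          cases j with
          | zero => simp
          | succ k => simp

-- a True run expands to "I-T"s under prev = true
theorem pvTags_run_true (run rest : List String) (h : ∀ y ∈ run, pvF y = true) :
    pvTags true (run ++ rest) = List.replicate run.length "I-T" ++ pvTags true rest := by
  induction run with
  | nil => rfl
  | cons y ys ih =>
      have hy : pvF y = true := h y (by simp)
      simp [pvTags, hy, ih (fun z hz => h z (by simp [hz])), List.replicate_succ]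

-- a False run expands to "O"s under prev = false
theorem pvTags_run_false (run rest : List String) (h : ∀ y ∈ run, pvF y = false) :
    pvTags false (run ++ rest) = List.replicate run.length "O" ++ pvTags false rest := by
  induction run with
  | nil => rfl
  | cons y ys ih =>
      have hy : pvF y = false := h y (by simp)
      simp [pvTags, hy, ih (fun z hz => h z (by simp [hz])), List.replicate_succ]

theorem pvAltRuns_eq_tags (l : List String) : pvAltRuns l = pvTags false l := by
  induction l using pvAltRuns.induct with
  | case1 => simp [pvAltRuns, pvTags]
  | case2 x xs flag ih =>
      have hf : flag = PySem.Str.isIn "T" x := rfl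
      have hunf : pvAltRuns (x :: xs) =
          (if PySem.Str.isIn "T" x then
              "B-T" :: List.replicate (xs.takeWhile (fun y => PySem.Str.isIn "T" y == PySem.Str.isIn "T" x)).length "I-T"
            else List.replicate ((xs.takeWhile (fun y => PySem.Str.isIn "T" y == PySem.Str.isIn "T" x)).length + 1) "O")
          ++ pvAltRuns (xs.dropWhile (fun y => PySem.Str.isIn "T" y == PySem.Str.isIn "T" x)) := by
        simp only [pvAltRuns]
      cases hb : PySem.Str.isIn "T" x with
      | true =>
          rw [hb] at hf
          rw [hf] at ih
          have hrun : ∀ y ∈ xs.takeWhile (fun y => PySem.Str.isIn "T" y == true), pvF y = true := by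
            intro y hy
            simpa [pvF] using List.mem_takeWhile_imp hy
          have hsplit : xs =
              xs.takeWhile (fun y => PySem.Str.isIn "T" y == true)
              ++ xs.dropWhile (fun y => PySem.Str.isIn "T" y == true) :=
            (List.takeWhile_append_dropWhile).symm
          have hcongr : pvTags true (xs.dropWhile (fun y => PySem.Str.isIn "T" y == true)) =
              pvTags false (xs.dropWhile (fun y => PySem.Str.isIn "T" y == true)) := by
            have h := List.head?_dropWhile_not (fun y => PySem.Str.isIn "T" y == true) xs
            cases hrest : xs.dropWhile (fun y => PySem.Str.isIn "T" y == true) with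
            | nil => rfl
            | cons z zs =>
                rw [hrest] at h
                simp only [List.head?_cons] at h
                simp only [pvTags]
                rw [show pvF z = false from by simpa [pvF] using h]
                simp
          have hhead : pvTags false (x :: (xs.takeWhile (fun y => PySem.Str.isIn "T" y == true)
              ++ xs.dropWhile (fun y => PySem.Str.isIn "T" y == true))) =
              "B-T" :: pvTags true (xs.takeWhile (fun y => PySem.Str.isIn "T" y == true)
              ++ xs.dropWhile (fun y => PySem.Str.isIn "T" y == true)) := by
            simp only [pvTags]
            rw [show pvF x = true from by simpa [pvF] using hb]
            simp
          rw [hunf]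
          simp only [hb]
          conv_rhs => rw [hsplit]
          rw [hhead, pvTags_run_true _ _ hrun, hcongr, ← ih]
          simp
      | false =>
          rw [hb] at hf
          rw [hf] at ih
          have hrun : ∀ y ∈ xs.takeWhile (fun y => PySem.Str.isIn "T" y == false), pvF y = false := by
            intro y hy
            simpa [pvF] using List.mem_takeWhile_imp hy
          have hsplit : xs =
              xs.takeWhile (fun y => PySem.Str.isIn "T" y == false)
              ++ xs.dropWhile (fun y => PySem.Str.isIn "T" y == false) :=
            (List.takeWhile_append_dropWhile).symm
          have hhead : pvTags false (x :: (xs.takeWhile (fun y => PySem.Str.isIn "T" y == false)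
              ++ xs.dropWhile (fun y => PySem.Str.isIn "T" y == false))) =
              "O" :: pvTags false (xs.takeWhile (fun y => PySem.Str.isIn "T" y == false)
              ++ xs.dropWhile (fun y => PySem.Str.isIn "T" y == false)) := by
            simp only [pvTags]
            rw [show pvF x = false from by simpa [pvF] using hb]
            simp
          rw [hunf]
          simp only [hb]
          conv_rhs => rw [hsplit]
          rw [hhead, pvTags_run_false _ _ hrun, ih, List.replicate_succ]
          simp

-- the one-element tag A computes at position p = (i, note) of enumerate notes
def pvATag (notes : List String) (p : Int × String) : String :=
  if p.1 == 0 then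
    if PySem.Str.isIn "T" (PySem.List.pyGetD notes p.1 "") then "B-T" else "O"
  else
    if PySem.Str.isIn "T" (PySem.List.pyGetD notes p.1 "") then
      if !(PySem.Str.isIn "T" (PySem.List.pyGetD notes (p.1 - 1) "")) then "B-T" else "I-T"
    else "O"

theorem pvA_eq_tags (notes : List String) :
    (PySem.List.enumerate notes 0).foldl
        (fun input_notes p =>
          let i := p.1
          if i == 0 then
            if PySem.Str.isIn "T" (PySem.List.pyGetD notes i "") then input_notes ++ ["B-T"]
            else input_notes ++ ["O"]
          else
            if PySem.Str.isIn "T" (PySem.List.pyGetD notes i "") then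
              if !(PySem.Str.isIn "T" (PySem.List.pyGetD notes (i - 1) "")) then input_notes ++ ["B-T"]
              else input_notes ++ ["I-T"]
            else input_notes ++ ["O"]) [] = pvTags false notes := by
  have hbody : (fun (input_notes : List String) (p : Int × String) =>
          let i := p.1
          if i == 0 then
            if PySem.Str.isIn "T" (PySem.List.pyGetD notes i "") then input_notes ++ ["B-T"]
            else input_notes ++ ["O"]
          else
            if PySem.Str.isIn "T" (PySem.List.pyGetD notes i "") then
              if !(PySem.Str.isIn "T" (PySem.List.pyGetD notes (i - 1) "")) then input_notes ++ ["B-T"]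
              else input_notes ++ ["I-T"]
            else input_notes ++ ["O"])
        = (fun input_notes p => input_notes ++ [pvATag notes p]) := by
    funext acc p
    simp only [pvATag]
    split_ifs <;> rfl
  rw [hbody, PySem.List.foldl_append_singleton_eq_map, List.nil_append]
  apply List.ext_getElem
  · simp [PySem.List.length_enumerate, pvTags_length]
  · intro i h1 h2
    have hi : i < notes.length := by simpa [PySem.List.length_enumerate] using h1
    rw [List.getElem_map, PySem.List.getElem_enumerate, pvTags_getElem false notes i hi]
    simp only [pvATag, Int.zero_add]
    by_cases h0 : i = 0
    · subst h0
      simp [pvF, PySem.List.pyGetD_zero, List.getD_eq_getElem?_getD, List.getElem?_eq_getElem hi]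
    · have hne : ((i : Int) == 0) = false := by
        simp only [beq_eq_false_iff_ne, ne_eq]
        exact_mod_cast h0
      have hcast : ((i : Int) - 1) = ((i - 1 : Nat) : Int) := by
        omega
      rw [hne, if_neg (by simp)]
      rw [hcast]
      simp only [PySem.List.pyGetD_natCast, List.getD_eq_getElem?_getD,
        List.getElem?_eq_getElem hi, List.getElem?_eq_getElem (show i - 1 < notes.length by omega),
        Option.getD_some]
      simp only [if_neg h0, pvF]
      cases hA : PySem.Str.isIn "T" notes[i] <;>
        cases hB : PySem.Str.isIn "T" (notes[i-1]'(by omega)) <;> simp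

-- ===== VERDICT (by name: the statement is the Claim_ definition above) =====
theorem trigger_data_further_process_spec : Claim_equal_trigger_data_further_process := by
  intro input _ hpre
  unfold Spec_trigger_data_further_process
  unfold trigger_data_further_process trigger_data_further_process_alt
  cases hget : (PySem.Dict.mk input).get? "notes" with
  | none =>
      exact absurd hpre (by
        unfold Pre_trigger_data_further_process
        rw [PySem.Dict.contains_eq_isSome_get?, hget]
        simp)
  | some notes => simp only [pvA_eq_tags, pvAltRuns_eq_tags]
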